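-- pv_equiv track=rewrite | github.com/ruslanmv/HomePilot | backend/app/studio/routes.py | _is_truncated_json
-- ===== SOURCE A (Python) =====
-- def _is_truncated_json(text: str) -> bool:
--     """
--     Check if JSON appears to be truncated.
--     Returns True if the text doesn't end with proper JSON closure.
--     """
--     if not text or not text.strip():
--         return True
--
--     cleaned = text.strip()
--     # Valid JSON should end with } or ] (possibly followed by whitespace)
--     if not cleaned.endswith('}') and not cleaned.endswith(']'):
--         return True
--
--     # Count braces/brackets - if unbalanced, it's truncated
--     depth_brace = 0
--     depth_bracket = 0
--     in_string = False
--     escape_next = False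
--
--     for char in cleaned:
--         if escape_next:
--             escape_next = False
--             continue
--         if char == '\\':
--             escape_next = True
--             continue
--         if char == '"' and not escape_next:
--             in_string = not in_string
--             continue
--         if in_string:
--             continue
--         if char == '{':
--             depth_brace += 1
--         elif char == '}':
--             depth_brace -= 1
--         elif char == '[':
--             depth_bracket += 1
--         elif char == ']':
--             depth_bracket -= 1
--
--     return depth_brace != 0 or depth_bracket != 0
-- ===== SOURCE B (Python) =====
-- def _is_truncated_json(text: str) -> bool:
--     """
--     Check if JSON appears to be truncated.
--     Returns True if the text doesn't end with proper JSON closure.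
--     """
--     if not text or not text.strip():
--         return True
--
--     cleaned = text.strip()
--     if not cleaned.endswith('}') and not cleaned.endswith(']'):
--         return True
--
--     # Stage 1: delete every backslash together with the character it escapes,
--     # consuming the input through an iterator (no escape flag needed).
--     it = iter(cleaned)
--     unescaped = []
--     for ch in it:
--         if ch == '\\':
--             next(it, None)  # drop the escaped character
--         else:
--             unescaped.append(ch)
--
--     # Stage 2: with escapes gone, every quote is a real delimiter, so the
--     # even-numbered chunks of a split on '"' are the text outside string literals.
--     structural = ''.join(''.join(unescaped).split('"')[0::2])
--
--     # Stage 3: balance check by library counts.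
--     return (structural.count('{') != structural.count('}')
--             or structural.count('[') != structural.count(']'))
-- ===== Notes on version B (the rewrite author's own statement) =====
-- stated objective: alternative
-- what changed: Replaces A's single fused loop with four state flags and two running depth counters by a staged pipeline with no state machine: first delete every backslash-escape pair via iterator consumption, then split the result on the quote character and keep the even-numbered chunks (the text outside string literals), then compare library counts of opening vs closing braces and of opening vs closing brackets on that text.
import Mathlib
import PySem

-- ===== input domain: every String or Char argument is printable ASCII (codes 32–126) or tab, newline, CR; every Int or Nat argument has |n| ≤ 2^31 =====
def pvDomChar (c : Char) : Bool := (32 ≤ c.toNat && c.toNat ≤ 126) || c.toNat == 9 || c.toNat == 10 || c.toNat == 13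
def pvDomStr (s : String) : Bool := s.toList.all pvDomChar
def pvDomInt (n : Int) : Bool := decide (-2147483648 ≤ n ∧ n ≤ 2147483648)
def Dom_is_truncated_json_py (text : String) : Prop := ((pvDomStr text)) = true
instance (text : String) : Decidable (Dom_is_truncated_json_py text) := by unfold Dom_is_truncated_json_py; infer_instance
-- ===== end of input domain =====

-- B replaces A's fused flag-driven depth loop by delete-escape-pairs, split-on-quotes, count-in-even-chunks (same O(n) cost); return value only.


-- ===== PORT A =====
-- A's loop body: state (depth_brace, depth_bracket, in_string, escape_next)
def pvStepA (st : Int × Int × Bool × Bool) (c : Char) : Int × Int × Bool × Bool :=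
  let db := st.1; let dbk := st.2.1; let ins := st.2.2.1; let esc := st.2.2.2
  if esc then (db, dbk, ins, false)
  else if c == '\\' then (db, dbk, ins, true)
  else if c == '"' && !esc then (db, dbk, !ins, esc)
  else if ins then (db, dbk, ins, esc)
  else if c == '{' then (db + 1, dbk, ins, esc)
  else if c == '}' then (db - 1, dbk, ins, esc)
  else if c == '[' then (db, dbk + 1, ins, esc)
  else if c == ']' then (db, dbk - 1, ins, esc)
  else (db, dbk, ins, esc)

def is_truncated_json_py (text : String) : Bool :=
  if text.toList.isEmpty || (PySem.Str.strip text).toList.isEmpty then true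
  else
    let cleaned := PySem.Str.strip text
    if !(PySem.Str.endswith cleaned "}") && !(PySem.Str.endswith cleaned "]") then true
    else
      let st := cleaned.toList.foldl pvStepA (0, 0, false, false)
      decide (st.1 ≠ 0) || decide (st.2.1 ≠ 0)

-- ===== PORT B =====
-- B stage 1: the iterator loop that drops every backslash together with the character after it
def pvStripEsc : List Char → List Char
  | [] => []
  | c :: cs => if c == '\\' then pvStripEsc cs.tail else c :: pvStripEsc cs
termination_by l => l.length
decreasing_by
  · simp only [List.length_tail, List.length_cons]; omega
  · simp

-- B's chunks[0::2]: every second element starting at index 0 (hand port of the step-2 slice, exact)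
def pvEverySecond : List (List Char) → List (List Char)
  | [] => []
  | [x] => [x]
  | x :: _ :: rest => x :: pvEverySecond rest

def is_truncated_json_py_alt (text : String) : Bool :=
  if text.toList.isEmpty || (PySem.Str.strip text).toList.isEmpty then true
  else
    let cleaned := PySem.Str.strip text
    if !(PySem.Str.endswith cleaned "}") && !(PySem.Str.endswith cleaned "]") then true
    else
      let unescaped := pvStripEsc cleaned.toList
      let chunks := PySem.Chars.splitOn unescaped ['"']
      let s := PySem.Chars.join [] (pvEverySecond chunks)
      decide (PySem.Chars.count s ['{'] ≠ PySem.Chars.count s ['}']) ||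
        decide (PySem.Chars.count s ['['] ≠ PySem.Chars.count s [']'])

-- ===== PRECONDITION & SPEC =====
def Spec_is_truncated_json_py (text : String) (out : Bool) : Prop := out = is_truncated_json_py_alt text
instance (text : String) (out : Bool) : Decidable (Spec_is_truncated_json_py text out) := by unfold Spec_is_truncated_json_py; infer_instance

-- ===== CLAIM (what is proved, stated in full; the proofs are below) =====
def Claim_equal_is_truncated_json_py : Prop := ∀ (text : String), Dom_is_truncated_json_py text → Spec_is_truncated_json_py text (is_truncated_json_py text)

-- ===== LEMMAS AND PROOFS =====

-- proof-only characterisation: the characters of cs outside string literals (ins = in_string, esc = escape pending)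
def pvStructural : List Char → Bool → Bool → List Char
  | [], _, _ => []
  | c :: cs, ins, esc =>
    if esc then pvStructural cs ins false
    else if c == '\\' then pvStructural cs ins true
    else if c == '"' then pvStructural cs (!ins) esc
    else if !ins then c :: pvStructural cs ins esc
    else pvStructural cs ins esc

-- A's fold keeps exactly the brace/bracket balance of the structural characters.
theorem pvLoop_counts (cs : List Char) : ∀ (ins esc : Bool) (db dbk : Int),
    (cs.foldl pvStepA (db, dbk, ins, esc)).1
      = db + ((pvStructural cs ins esc).count '{' : Int) - ((pvStructural cs ins esc).count '}' : Int)
    ∧ (cs.foldl pvStepA (db, dbk, ins, esc)).2.1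
      = dbk + ((pvStructural cs ins esc).count '[' : Int) - ((pvStructural cs ins esc).count ']' : Int) := by
  induction cs with
  | nil => intro ins esc db dbk; simp [pvStructural]
  | cons c cs ih =>
    intro ins esc db dbk
    by_cases hesc : esc = true
    · simpa [pvStepA, pvStructural, hesc] using ih ins false db dbk
    · replace hesc : esc = false := by simpa using hesc
      subst hesc
      by_cases hbs : c = '\\'
      · simpa [pvStepA, pvStructural, hbs] using ih ins true db dbk
      · by_cases hq : c = '"'
        · simpa [pvStepA, pvStructural, hq, hbs] using ih (!ins) false db dbk
        · by_cases hins : ins = true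
          · simpa [pvStepA, pvStructural, hq, hbs, hins] using ih ins false db dbk
          · replace hins : ins = false := by simpa using hins
            subst hins
            have h1 := (ih false false (db + 1) dbk); have h2 := (ih false false (db - 1) dbk)
            have h3 := (ih false false db (dbk + 1)); have h4 := (ih false false db (dbk - 1))
            have h0 := (ih false false db dbk)
            by_cases hob : c = '{'
            · simp [pvStepA, pvStructural, hob] at *; omega
            · by_cases hcb : c = '}'
              · simp [pvStepA, pvStructural, hcb] at *; omega
              · by_cases hos : c = '['
                · simp [pvStepA, pvStructural, hos] at *; omega
                · by_cases hcs : c = ']'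
                  · simp [pvStepA, pvStructural, hcs] at *; omega
                  · simp [pvStepA, pvStructural, hq, hbs, hob, hcb, hos, hcs] at *; omega

-- simple recursive form of split on '"'
def pvSplitQ : List Char → List (List Char)
  | [] => [[]]
  | c :: cs => if c == '"' then [] :: pvSplitQ cs
               else (c :: (pvSplitQ cs).headI) :: (pvSplitQ cs).tail

theorem pvSplitQ_ne_nil (l : List Char) : pvSplitQ l ≠ [] := by
  cases l with
  | nil => simp [pvSplitQ]
  | cons c cs => by_cases h : c = '"' <;> simp [pvSplitQ, h]

-- the fueled splitOn.go equals the simple recursion (sep = ['"'])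
theorem pvGo_splitQ (fuel : Nat) : ∀ (l cur : List Char) (acc : List (List Char)), l.length ≤ fuel →
    PySem.Chars.splitOn.go ['"'] fuel l cur acc
      = acc.reverse ++ ((cur.reverse ++ (pvSplitQ l).headI) :: (pvSplitQ l).tail) := by
  induction fuel with
  | zero =>
    intro l cur acc h
    have : l = [] := List.length_eq_zero_iff.mp (Nat.le_zero.mp h)
    subst this; simp [PySem.Chars.splitOn.go, pvSplitQ]
  | succ fuel ih =>
    intro l cur acc h
    cases l with
    | nil => simp [PySem.Chars.splitOn.go, pvSplitQ]
    | cons c rest =>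
      by_cases hq : c = '"'
      · subst hq
        have hpre : (['"'] : List Char).isPrefixOf ('"' :: rest) = true := by simp [List.isPrefixOf]
        rw [PySem.Chars.splitOn.go]
        simp only [hpre, if_pos]
        have hdrop : List.drop (['"'] : List Char).length ('"' :: rest) = rest := rfl
        rw [hdrop, ih rest [] (cur.reverse :: acc) (by simpa using Nat.le_of_succ_le_succ h)]
        simp [pvSplitQ]
        obtain ⟨a, t, hsx⟩ := List.exists_cons_of_ne_nil (pvSplitQ_ne_nil rest)
        simp [hsx]
      · have hpre : (['"'] : List Char).isPrefixOf (c :: rest) = false := by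
          simp [List.isPrefixOf]; exact fun h' => hq h'.symm
        rw [PySem.Chars.splitOn.go]
        simp only [hpre, Bool.false_eq_true, if_neg, not_false_iff]
        rw [ih rest (c :: cur) acc (by simpa using Nat.le_of_succ_le_succ h)]
        simp [pvSplitQ, hq]

theorem pvSplitOn_eq (l : List Char) : PySem.Chars.splitOn l ['"'] = pvSplitQ l := by
  have h := pvGo_splitQ (l.length + 1) l [] [] (by omega)
  unfold PySem.Chars.splitOn
  rw [h]
  have := pvSplitQ_ne_nil l
  cases hsq : pvSplitQ l with
  | nil => exact absurd hsq this
  | cons a t => simp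

-- flattening every second chunk = alternating concatenation
mutual
-- chunks at even positions, concatenated
def pvEV : List (List Char) → List Char
  | [] => []
  | h :: t => h ++ pvOD t
-- the same after a skipped odd chunk
def pvOD : List (List Char) → List Char
  | [] => []
  | _ :: t => pvEV t
end

theorem pvFlatten_everySecond (ch : List (List Char)) : (pvEverySecond ch).flatten = pvEV ch := by
  induction ch using pvEverySecond.induct with
  | case1 => simp [pvEverySecond, pvEV]
  | case2 x => simp [pvEverySecond, pvEV, pvOD]
  | case3 x y rest ih => simp [pvEverySecond, pvEV, pvOD, ih]

theorem pvJoin_nil_flatten (l : List (List Char)) : PySem.Chars.join [] l = l.flatten := by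
  induction l with
  | nil => simp [PySem.Chars.join, List.intercalate]
  | cons h t ih =>
    cases t with
    | nil => simp [PySem.Chars.join, List.intercalate]
    | cons h2 t2 =>
      simp only [PySem.Chars.join, List.intercalate] at *
      simp [List.intersperse] at *
      simp [ih]

-- text outside string literals, given the quote-toggle state (no escapes present)
def pvOutside : List Char → Bool → List Char
  | [], _ => []
  | c :: cs, ins =>
    if c == '"' then pvOutside cs (!ins)
    else if !ins then c :: pvOutside cs ins
    else pvOutside cs ins

theorem pvEV_OD_splitQ (l : List Char) :
    pvEV (pvSplitQ l) = pvOutside l false ∧ pvOD (pvSplitQ l) = pvOutside l true := by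
  induction l with
  | nil => simp [pvSplitQ, pvEV, pvOD, pvOutside]
  | cons c cs ih =>
    by_cases hq : c = '"'
    · simp [pvSplitQ, pvEV, pvOD, pvOutside, hq, ih.1, ih.2]
    · obtain ⟨h1, h2⟩ := ih
      have hne := pvSplitQ_ne_nil cs
      cases hsq : pvSplitQ cs with
      | nil => exact absurd hsq hne
      | cons hh tt =>
        rw [hsq] at h1 h2
        constructor
        · simp [pvSplitQ, hq, hsq, pvEV, pvOutside]
          simpa [pvEV] using h1
        · simp [pvSplitQ, hq, hsq, pvOD, pvOutside]
          simpa [pvOD] using h2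

-- stripping escape pairs then toggling on quotes = A's structural characters
theorem pvOutside_strip (l : List Char) : ∀ ins, pvOutside (pvStripEsc l) ins = pvStructural l ins false := by
  induction l using pvStripEsc.induct with
  | case1 => intro ins; simp [pvStripEsc, pvStructural, pvOutside]
  | case2 c cs hbs ih =>
    intro ins
    have hc : c = '\\' := by simpa using hbs
    subst hc
    rw [pvStripEsc]
    simp only [beq_self_eq_true, if_pos]
    cases cs with
    | nil => simp [pvStructural, pvOutside, pvStripEsc] at *
    | cons x rest => simpa [pvStructural] using ih ins
  | case3 c cs hbs ih =>
    intro ins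
    have hc : ¬ (c = '\\') := by simpa using hbs
    by_cases hq : c = '"'
    · simp [pvStripEsc, pvStructural, pvOutside, hq, ih]
    · by_cases hins : ins = true
      · simp [pvStripEsc, pvStructural, pvOutside, hq, hc, hins, ih]
      · replace hins : ins = false := by simpa using hins
        simp [pvStripEsc, pvStructural, pvOutside, hq, hc, hins, ih]

-- the fueled Chars.count.go for a single-character needle counts occurrences
theorem pvCountGo (c : Char) (fuel : Nat) : ∀ (l : List Char) (acc : Nat), l.length ≤ fuel →
    PySem.Chars.count.go [c] fuel l acc = acc + l.count c := by
  induction fuel with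
  | zero =>
    intro l acc h
    have : l = [] := List.length_eq_zero_iff.mp (Nat.le_zero.mp h)
    subst this; simp [PySem.Chars.count.go]
  | succ fuel ih =>
    intro l acc h
    cases l with
    | nil => simp [PySem.Chars.count.go]
    | cons x rest =>
      by_cases hx : c = x
      · subst hx
        have hpre : ([c] : List Char).isPrefixOf (c :: rest) = true := by simp [List.isPrefixOf]
        rw [PySem.Chars.count.go]
        simp only [hpre, if_pos]
        have hdrop : List.drop ([c] : List Char).length (c :: rest) = rest := rfl
        rw [hdrop, ih rest (acc + 1) (by simpa using Nat.le_of_succ_le_succ h)]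
        simp; omega
      · have hpre : ([c] : List Char).isPrefixOf (x :: rest) = false := by
          simp [List.isPrefixOf]; exact hx
        rw [PySem.Chars.count.go]
        simp only [hpre, Bool.false_eq_true, if_neg, not_false_iff]
        rw [ih rest acc (by simpa using Nat.le_of_succ_le_succ h)]
        have hx' : ¬ x = c := fun h' => hx h'.symm
        simp [hx']

theorem pvCount_single (s : List Char) (c : Char) : PySem.Chars.count s [c] = s.count c := by
  unfold PySem.Chars.count
  simp only [List.isEmpty_cons, if_neg, Bool.false_eq_true, not_false_iff]
  exact by simpa using pvCountGo c s.length s 0 (le_refl _)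

-- B's structural string is exactly A's structural characters
theorem pvB_structural (l : List Char) :
    PySem.Chars.join [] (pvEverySecond (PySem.Chars.splitOn (pvStripEsc l) ['"'])) = pvStructural l false false := by
  rw [pvSplitOn_eq, pvJoin_nil_flatten, pvFlatten_everySecond,
      (pvEV_OD_splitQ (pvStripEsc l)).1, pvOutside_strip]

-- ===== VERDICT (by name: the statement is the Claim_ definition above) =====
theorem is_truncated_json_py_spec : Claim_equal_is_truncated_json_py := by
  intro text _
  unfold Spec_is_truncated_json_py is_truncated_json_py is_truncated_json_py_alt
  dsimp only
  split
  · rfl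
  · split
    · rfl
    · have h := pvLoop_counts (PySem.Str.strip text).toList false false 0 0
      rw [h.1, h.2, pvB_structural, pvCount_single, pvCount_single, pvCount_single, pvCount_single]
      generalize (pvStructural (PySem.Str.strip text).toList false false).count '{' = a
      generalize (pvStructural (PySem.Str.strip text).toList false false).count '}' = b
      generalize (pvStructural (PySem.Str.strip text).toList false false).count '[' = c
      generalize (pvStructural (PySem.Str.strip text).toList false false).count ']' = d
      congr 1 <;> exact decide_eq_decide.mpr (by omega)
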